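-- pv_equiv track=rewrite | github.com/azhou202/ROS_Battleship | scripts/board_construction_utils.py | path_checker
-- ===== SOURCE A (Python) =====
-- def path_checker(board, length, x, y):
--     """
--     Returns a list of possible ship placement paths.
--
--     Parameters
--     ----------
--     board: Board
--         The Board object that holds the ships
--     length: int
--         Length of the ship
--     x: int
--         Starting x coordinate of the ship
--     y: int
--         Starting y coordinate of the ship
--
--     Return
--     ------
--     paths: list
--         A list that contains the legal directions that a ship can be placed in.
--     """
--
--     paths = ['R', 'L', 'D', 'U']
--
--     for i in range(length):
--         if y+i > 7 or board[x][y+i] != 99: #RIGHT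
--             if paths.count('R') != 0:
--                 paths.remove('R')
--         if y-i < 0 or board[x][y-i] != 99: #LEFT
--             if paths.count('L') != 0:
--                 paths.remove('L')
--         if x+i > 7 or board[x+i][y] != 99: #DOWN
--             if paths.count('D') != 0:
--                 paths.remove('D')
--         if x-i < 0 or board[x-i][y] != 99: #UP
--             if paths.count('U') != 0:
--                 paths.remove('U')
--
--     return paths
-- ===== SOURCE B (Python) =====
-- def path_checker(board, length, x, y):
--     R = all([y + i <= 7 and board[x][y + i] == 99 for i in range(length)])
--     L = all([y - i >= 0 and board[x][y - i] == 99 for i in range(length)])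
--     D = all([x + i <= 7 and board[x + i][y] == 99 for i in range(length)])
--     U = all([x - i >= 0 and board[x - i][y] == 99 for i in range(length)])
--     return [d for d, ok in [('R', R), ('L', L), ('D', D), ('U', U)] if ok]
-- ===== Notes on version B (the rewrite author's own statement) =====
-- stated objective: simpler
-- what changed: Replaces A's single loop that mutates a shared paths list with count/remove by four independent per-direction all()-scans and a final filter of the fixed direction order.
import Mathlib
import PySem

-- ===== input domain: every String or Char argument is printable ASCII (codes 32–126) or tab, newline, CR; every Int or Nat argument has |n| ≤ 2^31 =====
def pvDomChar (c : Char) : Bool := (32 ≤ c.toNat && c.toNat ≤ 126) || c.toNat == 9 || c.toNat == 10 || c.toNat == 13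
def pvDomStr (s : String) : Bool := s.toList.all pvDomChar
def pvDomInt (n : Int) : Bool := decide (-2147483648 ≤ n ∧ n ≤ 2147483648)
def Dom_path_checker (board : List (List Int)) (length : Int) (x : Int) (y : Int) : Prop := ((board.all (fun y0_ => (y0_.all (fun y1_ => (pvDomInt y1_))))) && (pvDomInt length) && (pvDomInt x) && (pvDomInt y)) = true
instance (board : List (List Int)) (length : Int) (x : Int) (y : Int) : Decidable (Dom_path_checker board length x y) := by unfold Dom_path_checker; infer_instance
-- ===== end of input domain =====

-- B replaces A's remove-from-a-mutable-list loop by four independent per-direction scans (simpler decomposition; same cost).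

-- board[a][b] (Python negative indices wrap; default only reached outside Pre_)
def cellAt (board : List (List Int)) (a b : Int) : Int :=
  PySem.List.pyGetD (PySem.List.pyGetD board a []) b 0

-- ===== PORT A =====
-- Python:  if paths.count(d) != 0: paths.remove(d)
def condRemove (paths : List String) (d : String) : List String :=
  if PySem.List.count paths d ≠ 0 then (PySem.List.remove? paths d).getD paths else paths

-- one iteration of A's loop body
def stepA (board : List (List Int)) (x y : Int) (paths : List String) (i : Int) : List String :=
  let p1 := if y + i > 7 ∨ cellAt board x (y + i) ≠ 99 then condRemove paths "R" else paths
  let p2 := if y - i < 0 ∨ cellAt board x (y - i) ≠ 99 then condRemove p1 "L" else p1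
  let p3 := if x + i > 7 ∨ cellAt board (x + i) y ≠ 99 then condRemove p2 "D" else p2
  if x - i < 0 ∨ cellAt board (x - i) y ≠ 99 then condRemove p3 "U" else p3

def path_checker (board : List (List Int)) (length : Int) (x : Int) (y : Int) : List String :=
  (PySem.List.pyRange 0 length 1).foldl (stepA board x y) ["R", "L", "D", "U"]

-- ===== PORT B =====
-- all([... for i in range(length)])
def allDir (length : Int) (f : Int → Bool) : Bool :=
  ((PySem.List.pyRange 0 length 1).map f).all id

def path_checker_alt (board : List (List Int)) (length : Int) (x : Int) (y : Int) : List String :=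
  let R := allDir length (fun i => decide (y + i ≤ 7) && decide (cellAt board x (y + i) = 99))
  let L := allDir length (fun i => decide (0 ≤ y - i) && decide (cellAt board x (y - i) = 99))
  let D := allDir length (fun i => decide (x + i ≤ 7) && decide (cellAt board (x + i) y = 99))
  let U := allDir length (fun i => decide (0 ≤ x - i) && decide (cellAt board (x - i) y = 99))
  ([("R", R), ("L", L), ("D", D), ("U", U)] : List (String × Bool)).filterMap
    (fun p => if p.2 then some p.1 else none)

-- ===== PRECONDITION & SPEC =====
-- Pre_ excludes exactly the inputs on which A raises an IndexError, in closed form: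
-- per direction, the needed indices form an interval, so in-boundedness of board and of the
-- probed row(s) is a pair of interval bounds (for D/U a short scan over at most board.length
-- rows; the range bounds are clamped to the board so the scan is always small).
def Pre_path_checker (board : List (List Int)) (length : Int) (x : Int) (y : Int) : Prop :=
  (1 ≤ length ∧ y ≤ 7 →
     PySem.Raise.InRange board.length x ∧
     -(((PySem.List.pyGetD board x []).length : Int)) ≤ y ∧
     min (y + length - 1) 7 < (((PySem.List.pyGetD board x []).length : Int))) ∧
  (1 ≤ length ∧ 0 ≤ y →
     PySem.Raise.InRange board.length x ∧
     y < (((PySem.List.pyGetD board x []).length : Int))) ∧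
  (1 ≤ length ∧ x ≤ 7 →
     -((board.length : Int)) ≤ x ∧ min (x + length - 1) 7 < (board.length : Int) ∧
     ∀ a ∈ PySem.List.pyRange (max x (-((board.length : Int))))
         (min (min (x + length - 1) 7 + 1) (board.length : Int)) 1,
       PySem.Raise.InRange (PySem.List.pyGetD board a []).length y) ∧
  (1 ≤ length ∧ 0 ≤ x →
     x < (board.length : Int) ∧
     ∀ a ∈ PySem.List.pyRange (max (x - length + 1) 0) (min (x + 1) (board.length : Int)) 1,
       PySem.Raise.InRange (PySem.List.pyGetD board a []).length y)

instance (board : List (List Int)) (length : Int) (x : Int) (y : Int) :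
    Decidable (Pre_path_checker board length x y) := by
  unfold Pre_path_checker; infer_instance

def pvWitness_path_checker : List (List Int) × Int × Int × Int := ([[99]], 1, 0, 0)

def Spec_path_checker (board : List (List Int)) (length : Int) (x : Int) (y : Int) (out : List String) : Prop := out = path_checker_alt board length x y
instance (board : List (List Int)) (length : Int) (x : Int) (y : Int) (out : List String) : Decidable (Spec_path_checker board length x y out) := by unfold Spec_path_checker; infer_instance

-- ===== CLAIM (what is proved, stated in full; the proofs are below) =====
def Claim_equal_path_checker : Prop := ∀ (board : List (List Int)) (length : Int) (x : Int) (y : Int), Dom_path_checker board length x y → Pre_path_checker board length x y → Spec_path_checker board length x y (path_checker board length x y)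

-- ===== LEMMAS AND PROOFS =====

-- the 16 possible values of A's paths list, as a function of four "still legal" flags
def filt (a b c d : Bool) : List String :=
  (if a then ["R"] else []) ++ (if b then ["L"] else []) ++
  (if c then ["D"] else []) ++ (if d then ["U"] else [])

theorem condRemove_R (P : Prop) [Decidable P] (a b c d : Bool) :
    (if P then condRemove (filt a b c d) "R" else filt a b c d) = filt (a && !decide P) b c d := by
  by_cases hP : P <;> cases a <;> cases b <;> cases c <;> cases d <;> simp [hP] <;> try decide

theorem condRemove_L (P : Prop) [Decidable P] (a b c d : Bool) :
    (if P then condRemove (filt a b c d) "L" else filt a b c d) = filt a (b && !decide P) c d := by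
  by_cases hP : P <;> cases a <;> cases b <;> cases c <;> cases d <;> simp [hP] <;> try decide

theorem condRemove_D (P : Prop) [Decidable P] (a b c d : Bool) :
    (if P then condRemove (filt a b c d) "D" else filt a b c d) = filt a b (c && !decide P) d := by
  by_cases hP : P <;> cases a <;> cases b <;> cases c <;> cases d <;> simp [hP] <;> try decide

theorem condRemove_U (P : Prop) [Decidable P] (a b c d : Bool) :
    (if P then condRemove (filt a b c d) "U" else filt a b c d) = filt a b c (d && !decide P) := by
  by_cases hP : P <;> cases a <;> cases b <;> cases c <;> cases d <;> simp [hP] <;> try decide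

theorem stepA_filt (board : List (List Int)) (x y i : Int) (a b c d : Bool) :
    stepA board x y (filt a b c d) i =
      filt (a && !decide (y + i > 7 ∨ cellAt board x (y + i) ≠ 99))
           (b && !decide (y - i < 0 ∨ cellAt board x (y - i) ≠ 99))
           (c && !decide (x + i > 7 ∨ cellAt board (x + i) y ≠ 99))
           (d && !decide (x - i < 0 ∨ cellAt board (x - i) y ≠ 99)) := by
  simp only [stepA, condRemove_R, condRemove_L, condRemove_D, condRemove_U]

theorem foldA_filt (board : List (List Int)) (x y : Int) (l : List Int) :
    ∀ (a b c d : Bool),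
      l.foldl (stepA board x y) (filt a b c d) =
        filt (a && l.all (fun i => !decide (y + i > 7 ∨ cellAt board x (y + i) ≠ 99)))
             (b && l.all (fun i => !decide (y - i < 0 ∨ cellAt board x (y - i) ≠ 99)))
             (c && l.all (fun i => !decide (x + i > 7 ∨ cellAt board (x + i) y ≠ 99)))
             (d && l.all (fun i => !decide (x - i < 0 ∨ cellAt board (x - i) y ≠ 99))) := by
  induction l with
  | nil => intro a b c d; simp
  | cons i l ih =>
      intro a b c d
      simp only [List.foldl_cons, stepA_filt, ih, List.all_cons, ← Bool.and_assoc]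

theorem not_decide_gt_or_ne (u v : Int) :
    (!decide (u > 7 ∨ v ≠ 99)) = (decide (u ≤ 7) && decide (v = 99)) := by
  by_cases h1 : u ≤ 7 <;> by_cases h2 : v = 99 <;> simp [h1, h2] <;> omega

theorem not_decide_lt_or_ne (u v : Int) :
    (!decide (u < 0 ∨ v ≠ 99)) = (decide (0 ≤ u) && decide (v = 99)) := by
  by_cases h1 : (0:Int) ≤ u <;> by_cases h2 : v = 99 <;> simp [h1, h2] <;> omega

theorem filterMap_flags (a b c d : Bool) :
    ([("R", a), ("L", b), ("D", c), ("U", d)] : List (String × Bool)).filterMap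
        (fun p => if p.2 then some p.1 else none) = filt a b c d := by
  cases a <;> cases b <;> cases c <;> cases d <;> decide

-- ===== VERDICT (by name: the statement is the Claim_ definition above) =====
theorem path_checker_spec : Claim_equal_path_checker := by
  intro board length x y _ _
  unfold Spec_path_checker path_checker path_checker_alt allDir
  have h0 : (["R", "L", "D", "U"] : List String) = filt true true true true := by decide
  rw [h0, foldA_filt]
  rw [filterMap_flags]
  simp only [Bool.true_and, List.all_map, Function.comp_def, id_eq, not_decide_gt_or_ne,
    not_decide_lt_or_ne]
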